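-- pv_equiv track=rewrite | github.com/yoyoj1023/my-leetcode-solutions | quest/data-structures-and-algorithms/019-Detect-Capital/answer.py | detectCapitalUse_v3
-- ===== SOURCE A (Python) =====
-- def detectCapitalUse_v3(word: str) -> bool:
--     """
--     方法3: 計數大寫字母並根據規則判斷
--     時間複雜度: O(n)，遍歷一次字串計數大寫字母
--     空間複雜度: O(1)，只使用常數額外空間
--     """
--     n = len(word)
--     uppercase_count = sum(1 for c in word if c.isupper())
--
--     # 情況1: 全部大寫
--     if uppercase_count == n:
--         return True
--
--     # 情況2: 全部小寫
--     if uppercase_count == 0: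
--         return True
--
--     # 情況3: 只有首字母大寫（大寫字母數量為1且第一個字母是大寫）
--     if uppercase_count == 1 and word[0].isupper():
--         return True
--
--     return False
-- ===== SOURCE B (Python) =====
-- def detectCapitalUse_v3(word: str) -> bool:
--     # No counting: valid capital use iff the tail has no uppercase letter
--     # (covers all-lowercase and Title-case), or every character is uppercase.
--     return all(not c.isupper() for c in word[1:]) or all(c.isupper() for c in word)
-- ===== Notes on version B (the rewrite author's own statement) =====
-- stated objective: simpler
-- what changed: B drops A's counter-and-three-comparisons entirely and decides by two short-circuit universal predicates: the tail contains no uppercase letter, or every character is uppercase.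
import Mathlib
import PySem

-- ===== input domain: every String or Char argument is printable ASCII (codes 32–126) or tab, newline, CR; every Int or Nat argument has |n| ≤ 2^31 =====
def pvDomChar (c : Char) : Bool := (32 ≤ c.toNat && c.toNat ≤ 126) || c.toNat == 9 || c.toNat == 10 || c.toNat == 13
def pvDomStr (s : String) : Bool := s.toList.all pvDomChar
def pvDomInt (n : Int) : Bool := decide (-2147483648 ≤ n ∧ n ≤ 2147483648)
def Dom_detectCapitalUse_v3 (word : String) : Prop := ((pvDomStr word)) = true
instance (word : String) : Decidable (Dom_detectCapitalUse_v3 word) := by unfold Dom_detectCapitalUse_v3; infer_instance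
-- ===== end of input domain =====

-- B replaces A's uppercase counter and three comparisons by two short-circuit
-- universal predicates (tail has no uppercase, or all uppercase); objective: simpler.
-- ===== PORT A =====
def detectCapitalUse_v3 (word : String) : Bool :=
  let n := word.toList.length
  let uppercaseCount := word.toList.foldl (fun acc c => if PySem.Chars.isupper c then acc + 1 else acc) 0
  if uppercaseCount == n then true
  else if uppercaseCount == 0 then true
  -- word[0] is only evaluated when uppercaseCount == 1, hence word ≠ "": pyGet? is some there
  else if uppercaseCount == 1 && ((PySem.Str.pyGet? word 0).map PySem.Chars.isupper).getD false then true
  else false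

-- ===== PORT B =====
def detectCapitalUse_v3_alt (word : String) : Bool :=
  (word.toList.drop 1).all (fun c => !PySem.Chars.isupper c)
    || word.toList.all (fun c => PySem.Chars.isupper c)

-- ===== PRECONDITION & SPEC =====
def Spec_detectCapitalUse_v3 (word : String) (out : Bool) : Prop := out = detectCapitalUse_v3_alt word
instance (word : String) (out : Bool) : Decidable (Spec_detectCapitalUse_v3 word out) := by unfold Spec_detectCapitalUse_v3; infer_instance

-- ===== CLAIM (what is proved, stated in full; the proofs are below) =====
def Claim_equal_detectCapitalUse_v3 : Prop := ∀ (word : String), Dom_detectCapitalUse_v3 word → Spec_detectCapitalUse_v3 word (detectCapitalUse_v3 word)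

-- ===== LEMMAS AND PROOFS =====
-- A's fold computes countP
theorem pv_fold_count (l : List Char) (k : Nat) :
    l.foldl (fun acc c => if PySem.Chars.isupper c then acc + 1 else acc) k
      = k + l.countP PySem.Chars.isupper := by
  induction l generalizing k with
  | nil => rfl
  | cons c t ih =>
    simp only [List.foldl_cons, List.countP_cons, ih]
    split <;> omega

theorem pv_all_pos (l : List Char) (p : Char → Bool) :
    l.all (fun c => p c) = (l.countP p == l.length) := by
  rw [Bool.eq_iff_iff]
  simp [List.all_eq_true, List.countP_eq_length]

theorem pv_countP_not_add (l : List Char) (p : Char → Bool) :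
    l.countP (fun c => !p c) + l.countP p = l.length := by
  induction l with
  | nil => rfl
  | cons a t ih =>
    simp only [List.countP_cons, List.length_cons]
    by_cases h : p a = true <;> simp [h] <;> omega

-- ===== VERDICT (by name: the statement is the Claim_ definition above) =====
theorem detectCapitalUse_v3_spec : Claim_equal_detectCapitalUse_v3 := by
  intro word _
  unfold Spec_detectCapitalUse_v3 detectCapitalUse_v3 detectCapitalUse_v3_alt
  cases h : word.toList with
  | nil => simp
  | cons c rest =>
    have hc := List.countP_le_length (p := PySem.Chars.isupper) (l := rest)
    have hn := pv_countP_not_add rest PySem.Chars.isupper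
    have hget : PySem.Str.pyGet? word 0 = some c := by
      simp [PySem.Str.pyGet?, PySem.List.pyGet?, PySem.List.pyIdx?, h]
    simp only [pv_fold_count, List.countP_cons, List.length_cons, hget,
      Option.map_some, Option.getD_some, Nat.zero_add, List.drop_succ_cons,
      List.drop_zero, pv_all_pos]
    by_cases hu : PySem.Chars.isupper c = true <;>
      simp only [hu] <;>
      rw [Bool.eq_iff_iff] <;>
      simp only [Bool.or_eq_true, beq_iff_eq, Bool.and_eq_true, decide_eq_true_eq,
        Bool.if_false_right, Bool.if_true_left, and_true, if_true, if_false, Bool.false_eq_true, and_false, or_false] <;>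
      omega
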